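-- pv_equiv track=rewrite | github.com/Intonaze/Dz | Lession_5/dz5.py | k_islower
-- ===== SOURCE A (Python) =====
-- import string
--
-- def k_islower(s: str) -> bool:
--     lower = True
--     for i in s:
--         if i in string.ascii_uppercase:
--             lower = False
--     letter = False
--     for i in s:
--         if i in string.ascii_letters:
--             letter = True
--     return lower and letter
-- ===== SOURCE B (Python) =====
-- import string
--
-- def k_islower(s: str) -> bool:
--     chars = set(s)
--     has_lower = bool(chars & set(string.ascii_lowercase))
--     has_upper = bool(chars & set(string.ascii_uppercase))
--     return has_lower and not has_upper
-- ===== Notes on version B (the rewrite author's own statement) =====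
-- stated objective: idiomatic
-- what changed: B deduplicates the string into a character set once and decides the answer by set intersection with the lowercase/uppercase alphabets (has_lower and not has_upper), replacing A's two full-string latch loops that test every character against the 26/52-letter alphabet strings.
import Mathlib
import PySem

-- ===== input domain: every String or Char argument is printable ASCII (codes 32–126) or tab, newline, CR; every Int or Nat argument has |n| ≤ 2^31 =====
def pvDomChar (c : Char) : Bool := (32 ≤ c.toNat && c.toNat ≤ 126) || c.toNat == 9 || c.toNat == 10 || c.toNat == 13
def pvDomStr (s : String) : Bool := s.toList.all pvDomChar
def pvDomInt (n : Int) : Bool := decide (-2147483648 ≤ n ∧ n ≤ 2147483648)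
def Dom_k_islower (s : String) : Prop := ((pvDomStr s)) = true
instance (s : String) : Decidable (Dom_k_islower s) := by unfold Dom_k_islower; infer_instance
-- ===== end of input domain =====

-- B replaces A's two latch loops by building set(s) once and intersecting it with the
-- lowercase/uppercase alphabets (idiomatic set algebra); return values proved equal.

-- ===== PORT A =====
def asciiUppercase : List Char := "ABCDEFGHIJKLMNOPQRSTUVWXYZ".toList
def asciiLowercase : List Char := "abcdefghijklmnopqrstuvwxyz".toList
def asciiLetters : List Char := asciiLowercase ++ asciiUppercase   -- string.ascii_letters

def k_islower (s : String) : Bool :=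
  let lower := s.toList.foldl (fun lower i => if asciiUppercase.contains i then false else lower) true
  let letter := s.toList.foldl (fun letter i => if asciiLetters.contains i then true else letter) false
  lower && letter

-- ===== PORT B =====
def k_islower_alt (s : String) : Bool :=
  let chars : PySem.Set Char := PySem.Set.ofList s.toList
  let hasLower := !(PySem.Set.inter chars (PySem.Set.ofList asciiLowercase)).isEmpty
  let hasUpper := !(PySem.Set.inter chars (PySem.Set.ofList asciiUppercase)).isEmpty
  hasLower && !hasUpper

-- ===== PRECONDITION & SPEC =====
def Spec_k_islower (s : String) (out : Bool) : Prop := out = k_islower_alt s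
instance (s : String) (out : Bool) : Decidable (Spec_k_islower s out) := by unfold Spec_k_islower; infer_instance

-- ===== CLAIM (what is proved, stated in full; the proofs are below) =====
def Claim_equal_k_islower : Prop := ∀ (s : String), Dom_k_islower s → Spec_k_islower s (k_islower s)

-- ===== LEMMAS AND PROOFS =====

-- A's first loop latches to false on a hit: it computes b && !(l.any p)
theorem foldl_latch_false (p : Char → Bool) (l : List Char) (b : Bool) :
    l.foldl (fun acc i => if p i then false else acc) b = (b && !(l.any p)) := by
  induction l generalizing b with
  | nil => simp
  | cons a l ih =>
    rw [List.foldl_cons, ih, List.any_cons]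
    by_cases h : p a = true <;> simp [h]

-- A's second loop latches to true on a hit: it computes b || l.any p
theorem foldl_latch_true (p : Char → Bool) (l : List Char) (b : Bool) :
    l.foldl (fun acc i => if p i then true else acc) b = (b || l.any p) := by
  induction l generalizing b with
  | nil => simp
  | cons a l ih =>
    rw [List.foldl_cons, ih, List.any_cons]
    by_cases h : p a = true <;> simp [h]

-- B's set intersection is nonempty iff some character of the string lies in the alphabet
theorem inter_nonempty_iff (l alpha : List Char) :
    (!(PySem.Set.inter (PySem.Set.ofList l) (PySem.Set.ofList alpha)).isEmpty) = l.any (alpha.contains ·) := by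
  rcases h : l.any (alpha.contains ·) with _ | _
  · have hnil : PySem.Set.inter (PySem.Set.ofList l) (PySem.Set.ofList alpha) = [] := by
      apply List.eq_nil_iff_forall_not_mem.mpr
      intro x hx
      rcases (PySem.Set.mem_inter _ _ _).mp hx with ⟨h1, h2⟩
      have hx1 := (PySem.Set.mem_ofList _ _).mp h1
      have hx2 := (PySem.Set.mem_ofList _ _).mp h2
      have := List.any_eq_false.mp h x hx1
      simp_all
    simp [hnil]
  · rcases List.any_eq_true.mp h with ⟨x, hx, hmem⟩
    have hmem' : x ∈ PySem.Set.inter (PySem.Set.ofList l) (PySem.Set.ofList alpha) :=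
      (PySem.Set.mem_inter _ _ _).mpr ⟨(PySem.Set.mem_ofList _ _).mpr hx,
        (PySem.Set.mem_ofList _ _).mpr (by simpa using hmem)⟩
    simp only [Bool.not_eq_true']
    rw [List.isEmpty_eq_false_iff_exists_mem]
    exact ⟨x, hmem'⟩

theorem letters_split (c : Char) :
    asciiLetters.contains c = (asciiLowercase.contains c || asciiUppercase.contains c) := by
  simp [asciiLetters]

-- ===== VERDICT (by name: the statement is the Claim_ definition above) =====
theorem k_islower_spec : Claim_equal_k_islower := by
  intro s _
  show (let lower := s.toList.foldl (fun lower i => if asciiUppercase.contains i then false else lower) true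
        let letter := s.toList.foldl (fun letter i => if asciiLetters.contains i then true else letter) false
        lower && letter) = k_islower_alt s
  show (s.toList.foldl (fun lower i => if asciiUppercase.contains i then false else lower) true
        && s.toList.foldl (fun letter i => if asciiLetters.contains i then true else letter) false)
      = (!(PySem.Set.inter (PySem.Set.ofList s.toList) (PySem.Set.ofList asciiLowercase)).isEmpty
        && !(!(PySem.Set.inter (PySem.Set.ofList s.toList) (PySem.Set.ofList asciiUppercase)).isEmpty))
  rw [foldl_latch_false, foldl_latch_true, inter_nonempty_iff, inter_nonempty_iff]
  have hsplit : s.toList.any (asciiLetters.contains ·)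
      = (s.toList.any (asciiLowercase.contains ·) || s.toList.any (asciiUppercase.contains ·)) := by
    simp only [letters_split]
    induction s.toList with
    | nil => rfl
    | cons a l ih => rw [List.any_cons, List.any_cons, List.any_cons, ih]; ac_rfl
  rw [hsplit]
  cases s.toList.any (asciiLowercase.contains ·) <;> cases s.toList.any (asciiUppercase.contains ·) <;> rfl
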